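-- pv_equiv track=rewrite | github.com/tsoares36/general | guitarStrings.py | getSevenStringScale
-- ===== SOURCE A (Python) =====
-- def getSevenStringScale(fretboard):
--     # cordas soltas da guitarra de sete cordas, na afinação padrão
--
--     strings = {"B0":0, "E1":1, "A":1, "D":2, "G":2, "B":2, "E":3}
--     valor = 1
--     real_notes_fretboard = []
--
--     for i in range(len(fretboard)):
--         v = []
--
--         for j in range(len(fretboard[i])):
--             # i == 0 and j == 0 representa 'primeira' corda solta
--             if j == 0:
--                 if i == 0 or i == 1:
--                     # representa a 'primeira' ou a 'segunda' corda solta (B ou E)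
--                     simple_note = fretboard[i][j] + str(i)
--
--                 valor = strings.get(simple_note)
--
--             else:
--                 simple_note = fretboard[i][j]
--
--                 if simple_note == "C":
--
--                     if valor is not None:
--                         valor += 1
--
--             real_note = "./sounds/" + fretboard[i][j] + str(valor) + ".mp3"
--             v.append(real_note)
--
--         real_notes_fretboard.append(v)
--
--     return real_notes_fretboard
-- ===== SOURCE B (Python) =====
-- def getSevenStringScale(fretboard):
--     strings = {"B0": 0, "E1": 1, "A": 1, "D": 2, "G": 2, "B": 2, "E": 3}
--     # pass 1: flatten the board into (row, column, note) cells and thread the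
--     # running (valor, simple_note) state over that single flat sequence
--     cells = [(i, j, note) for i, row in enumerate(fretboard) for j, note in enumerate(row)]
--     valor, simple_note = 1, None
--     flat = []
--     for i, j, note in cells:
--         if j == 0:
--             if i < 2:
--                 simple_note = note + str(i)
--             valor = strings.get(simple_note)
--         else:
--             simple_note = note
--             if note == "C" and valor is not None:
--                 valor += 1
--         flat.append("./sounds/" + note + str(valor) + ".mp3")
--     # pass 2: cut the flat path list back into the shape of the input board
--     out, pos = [], 0
--     for row in fretboard:
--         out.append(flat[pos:pos + len(row)])
--         pos += len(row)
--     return out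
-- ===== Notes on version B (the rewrite author's own statement) =====
-- stated objective: alternative
-- what changed: B replaces A's nested index loops by a two-phase pipeline: it flattens the board into one (row,col,note) cell sequence, threads the valor/simple_note state over that single flat fold, and then reslices the flat path list back into the board's row shape.
import Mathlib
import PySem

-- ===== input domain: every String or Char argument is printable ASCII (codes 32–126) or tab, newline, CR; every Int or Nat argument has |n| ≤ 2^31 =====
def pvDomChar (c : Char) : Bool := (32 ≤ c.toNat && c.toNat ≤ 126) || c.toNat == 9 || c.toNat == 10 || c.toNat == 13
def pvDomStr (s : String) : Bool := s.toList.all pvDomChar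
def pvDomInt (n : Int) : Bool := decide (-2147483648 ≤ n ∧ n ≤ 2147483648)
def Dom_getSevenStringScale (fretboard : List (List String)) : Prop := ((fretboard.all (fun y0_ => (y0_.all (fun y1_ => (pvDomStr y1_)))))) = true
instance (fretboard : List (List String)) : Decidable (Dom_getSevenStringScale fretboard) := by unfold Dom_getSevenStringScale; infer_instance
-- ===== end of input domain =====

-- B re-decomposes A's nested loops into two passes (flat cell fold, then reslice into rows);
-- same cost, alternative structure.  A raises UnboundLocalError when the first nonempty row
-- has index >= 2; Pre_ excludes exactly those inputs (B returns '...None.mp3' paths there).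

-- ===== PORT A =====
def pvStringsA : PySem.Dict String Int :=
  PySem.Dict.ofList [("B0", 0), ("E1", 1), ("A", 1), ("D", 2), ("G", 2), ("B", 2), ("E", 3)]

-- str(valor) where valor is an int or None
def pvStrValA : Option Int → String
  | none => "None"
  | some n => PySem.Int.toStr n

-- one iteration of A's inner loop body; the Option String is simple_note (none = still unbound,
-- only reachable outside Pre_)
def pvCellA (i : Int) (st : Option Int × Option String × List String) (jc : Int × String) :
    Option Int × Option String × List String :=
  let valor := st.1; let sn := st.2.1; let v := st.2.2
  let j := jc.1; let c := jc.2
  let p : Option Int × Option String :=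
    if j = 0 then
      let sn' := if i = 0 ∨ i = 1 then some (c ++ PySem.Int.toStr i) else sn
      ((match sn' with | some s => pvStringsA.get? s | none => none), sn')
    else
      ((if c = "C" then (match valor with | some n => some (n + 1) | none => none) else valor),
       some c)
  (p.1, p.2, v ++ ["./sounds/" ++ c ++ pvStrValA p.1 ++ ".mp3"])

-- one iteration of A's outer loop body
def pvRowA (st : Option Int × Option String × List (List String)) (ir : Int × List String) :
    Option Int × Option String × List (List String) :=
  let r := (PySem.List.enumerate ir.2).foldl (pvCellA ir.1) (st.1, st.2.1, [])
  (r.1, r.2.1, st.2.2 ++ [r.2.2])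

def getSevenStringScale (fretboard : List (List String)) : List (List String) :=
  ((PySem.List.enumerate fretboard).foldl pvRowA (some 1, none, [])).2.2

-- ===== PORT B =====
def pvStringsB : PySem.Dict String Int :=
  PySem.Dict.ofList [("B0", 0), ("E1", 1), ("A", 1), ("D", 2), ("G", 2), ("B", 2), ("E", 3)]

def pvStrValB : Option Int → String
  | none => "None"
  | some n => PySem.Int.toStr n

-- strings.get(simple_note); simple_note may be None, which is never a key
def pvGetB (sn : Option String) : Option Int :=
  match sn with
  | some s => pvStringsB.get? s
  | none => none

-- B's single flat pass over one (i, j, note) cell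
def pvCellB (st : Option Int × Option String × List String) (t : Int × Int × String) :
    Option Int × Option String × List String :=
  let valor := st.1; let sn := st.2.1; let flat := st.2.2
  let i := t.1; let j := t.2.1; let note := t.2.2
  let p : Option Int × Option String :=
    if j = 0 then
      let sn' := if i < 2 then some (note ++ PySem.Int.toStr i) else sn
      (pvGetB sn', sn')
    else
      ((if note = "C" ∧ valor ≠ none then valor.map (· + 1) else valor), some note)
  (p.1, p.2, flat ++ ["./sounds/" ++ note ++ pvStrValB p.1 ++ ".mp3"])

def getSevenStringScale_alt (fretboard : List (List String)) : List (List String) :=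
  let cells := (PySem.List.enumerate fretboard).flatMap
    (fun ir => (PySem.List.enumerate ir.2).map (fun jc => (ir.1, jc.1, jc.2)))
  let flat := (cells.foldl pvCellB (some 1, none, [])).2.2
  (fretboard.foldl
    (fun st row =>
      (st.1 ++ [PySem.List.slice flat (some st.2) (some (st.2 + (Int.ofNat row.length)))],
       st.2 + Int.ofNat row.length))
    ([], (0 : Int))).1

-- ===== PRECONDITION & SPEC =====
-- Pre_ excludes exactly the inputs where A raises UnboundLocalError: those whose first
-- nonempty row has index >= 2 (simple_note is then read before being assigned).
def Pre_getSevenStringScale (fretboard : List (List String)) : Prop :=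
  (∃ r ∈ fretboard.take 2, r ≠ []) ∨ (∀ r ∈ fretboard, r = [])
instance (fretboard : List (List String)) : Decidable (Pre_getSevenStringScale fretboard) := by
  unfold Pre_getSevenStringScale; infer_instance

def pvWitness_getSevenStringScale : List (List String) := [["B", "C", "D"], ["E", "F"], ["G", "C"]]

def Spec_getSevenStringScale (fretboard : List (List String)) (out : List (List String)) : Prop := out = getSevenStringScale_alt fretboard
instance (fretboard : List (List String)) (out : List (List String)) : Decidable (Spec_getSevenStringScale fretboard out) := by unfold Spec_getSevenStringScale; infer_instance

-- ===== CLAIM (what is proved, stated in full; the proofs are below) =====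
def Claim_equal_getSevenStringScale : Prop := ∀ (fretboard : List (List String)), Dom_getSevenStringScale fretboard → Pre_getSevenStringScale fretboard → Spec_getSevenStringScale fretboard (getSevenStringScale fretboard)

-- ===== LEMMAS AND PROOFS =====

lemma strval_eq : ∀ o : Option Int, pvStrValB o = pvStrValA o := by
  intro o; cases o <;> rfl

-- the two per-cell step functions agree (for a nonnegative row index)
lemma cell_eq (i : Int) (hi : 0 ≤ i) (st : Option Int × Option String × List String)
    (j : Int) (c : String) : pvCellB st (i, j, c) = pvCellA i st (j, c) := by
  obtain ⟨valor, sn, v⟩ := st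
  unfold pvCellB pvCellA pvGetB
  by_cases hj : j = 0
  · have h2 : (i < 2) = (i = 0 ∨ i = 1) := by
      apply propext; constructor <;> intro h <;> omega
    simp only [hj, if_true, h2]
    rfl
  · simp only [hj, if_false]
    by_cases hc : c = "C"
    · cases valor <;> simp [hc, strval_eq]
    · simp [hc, strval_eq]

-- shifting the accumulator through a cell step / a fold (A side)
lemma cellA_shift (i : Int) (valor : Option Int) (sn : Option String) (v : List String)
    (jc : Int × String) :
    pvCellA i (valor, sn, v) jc =
      ((pvCellA i (valor, sn, []) jc).1, (pvCellA i (valor, sn, []) jc).2.1,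
        v ++ (pvCellA i (valor, sn, []) jc).2.2) := by
  unfold pvCellA; simp

lemma foldA_shift (i : Int) (l : List (Int × String)) :
    ∀ (valor : Option Int) (sn : Option String) (v : List String),
    l.foldl (pvCellA i) (valor, sn, v) =
      ((l.foldl (pvCellA i) (valor, sn, [])).1, (l.foldl (pvCellA i) (valor, sn, [])).2.1,
        v ++ (l.foldl (pvCellA i) (valor, sn, [])).2.2) := by
  induction l with
  | nil => intro valor sn v; simp
  | cons x xs ih =>
    intro valor sn v
    simp only [List.foldl_cons]
    rcases hx : pvCellA i (valor, sn, []) x with ⟨a1, a2, a3⟩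
    have h1 : pvCellA i (valor, sn, v) x = (a1, a2, v ++ a3) := by
      rw [cellA_shift i valor sn v x, hx]
    rw [h1, ih a1 a2 (v ++ a3), ih a1 a2 a3]
    simp

-- shifting the accumulator through B's flat fold
lemma cellB_shift (valor : Option Int) (sn : Option String) (v : List String)
    (t : Int × Int × String) :
    pvCellB (valor, sn, v) t =
      ((pvCellB (valor, sn, []) t).1, (pvCellB (valor, sn, []) t).2.1,
        v ++ (pvCellB (valor, sn, []) t).2.2) := by
  unfold pvCellB; simp

lemma foldB_shift (l : List (Int × Int × String)) :
    ∀ (valor : Option Int) (sn : Option String) (v : List String),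
    l.foldl pvCellB (valor, sn, v) =
      ((l.foldl pvCellB (valor, sn, [])).1, (l.foldl pvCellB (valor, sn, [])).2.1,
        v ++ (l.foldl pvCellB (valor, sn, [])).2.2) := by
  induction l with
  | nil => intro valor sn v; simp
  | cons x xs ih =>
    intro valor sn v
    simp only [List.foldl_cons]
    rcases hx : pvCellB (valor, sn, []) x with ⟨a1, a2, a3⟩
    have h1 : pvCellB (valor, sn, v) x = (a1, a2, v ++ a3) := by
      rw [cellB_shift valor sn v x, hx]
    rw [h1, ih a1 a2 (v ++ a3), ih a1 a2 a3]
    simp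

-- B's flat fold over one row's cells is A's inner fold
lemma foldB_map (i : Int) (hi : 0 ≤ i) (l : List (Int × String)) :
    ∀ (st : Option Int × Option String × List String),
    (l.map (fun jc => (i, jc.1, jc.2))).foldl pvCellB st = l.foldl (pvCellA i) st := by
  induction l with
  | nil => intro st; rfl
  | cons x xs ih =>
    intro st
    simp only [List.map_cons, List.foldl_cons]
    rw [show ((i, x.1, x.2) : Int × Int × String) = (i, x) from rfl, cell_eq i hi st x.1 x.2]
    exact ih _

-- shifting the accumulator through A's outer fold
lemma rowA_shift (valor : Option Int) (sn : Option String) (acc : List (List String))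
    (ir : Int × List String) :
    pvRowA (valor, sn, acc) ir =
      ((pvRowA (valor, sn, []) ir).1, (pvRowA (valor, sn, []) ir).2.1,
        acc ++ (pvRowA (valor, sn, []) ir).2.2) := by
  unfold pvRowA; simp

lemma foldRowA_shift (rows : List (Int × List String)) :
    ∀ (valor : Option Int) (sn : Option String) (acc : List (List String)),
    rows.foldl pvRowA (valor, sn, acc) =
      ((rows.foldl pvRowA (valor, sn, [])).1, (rows.foldl pvRowA (valor, sn, [])).2.1,
        acc ++ (rows.foldl pvRowA (valor, sn, [])).2.2) := by
  induction rows with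
  | nil => intro valor sn acc; simp
  | cons r rs ih =>
    intro valor sn acc
    simp only [List.foldl_cons]
    rcases hr : pvRowA (valor, sn, []) r with ⟨a1, a2, a3⟩
    have h1 : pvRowA (valor, sn, acc) r = (a1, a2, acc ++ a3) := by
      rw [rowA_shift valor sn acc r, hr]
    rw [h1, ih a1 a2 (acc ++ a3), ih a1 a2 a3]
    simp

-- B's single flat fold equals A's nested folds, flattened
lemma main_fold (rows : List (Int × List String)) :
    ∀ (hge : ∀ ir ∈ rows, 0 ≤ ir.1) (valor : Option Int) (sn : Option String),
    (rows.flatMap (fun ir => (PySem.List.enumerate ir.2).map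
        (fun jc => (ir.1, jc.1, jc.2)))).foldl pvCellB (valor, sn, []) =
      ((rows.foldl pvRowA (valor, sn, [])).1, (rows.foldl pvRowA (valor, sn, [])).2.1,
        ((rows.foldl pvRowA (valor, sn, [])).2.2).flatten) := by
  induction rows with
  | nil => intro _ valor sn; rfl
  | cons r rs ih =>
    intro hge valor sn
    have hr0 : 0 ≤ r.1 := hge r (List.mem_cons_self ..)
    simp only [List.flatMap_cons, List.foldl_append, List.foldl_cons]
    rw [foldB_map r.1 hr0 _ _]
    rcases hF : (PySem.List.enumerate r.2).foldl (pvCellA r.1) (valor, sn, []) with ⟨a1, a2, a3⟩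
    have hrow : pvRowA (valor, sn, []) r = (a1, a2, [a3]) := by
      unfold pvRowA; rw [hF]; rfl
    rw [foldB_shift, ih (fun ir h => hge ir (List.mem_cons_of_mem _ h)) a1 a2]
    rw [hrow, foldRowA_shift rs a1 a2 [a3]]
    simp

-- each output row of A has the length of the corresponding input row
lemma lenA (i : Int) (l : List (Int × String)) :
    ∀ (valor : Option Int) (sn : Option String),
    ((l.foldl (pvCellA i) (valor, sn, [])).2.2).length = l.length := by
  induction l with
  | nil => intro valor sn; rfl
  | cons x xs ih =>
    intro valor sn
    simp only [List.foldl_cons]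
    rcases hx : pvCellA i (valor, sn, []) x with ⟨a1, a2, a3⟩
    have h3 : a3.length = 1 := by
      have : a3 = (pvCellA i (valor, sn, []) x).2.2 := by rw [hx]
      rw [this]; unfold pvCellA; simp
    rw [foldA_shift]
    simp [h3, ih]
    omega

lemma shapeA (rows : List (Int × List String)) :
    ∀ (valor : Option Int) (sn : Option String),
    ((rows.foldl pvRowA (valor, sn, [])).2.2).map List.length =
      rows.map (fun ir => ir.2.length) := by
  induction rows with
  | nil => intro valor sn; rfl
  | cons r rs ih =>
    intro valor sn
    simp only [List.foldl_cons]
    rcases hF : (PySem.List.enumerate r.2).foldl (pvCellA r.1) (valor, sn, []) with ⟨a1, a2, a3⟩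
    have hrow : pvRowA (valor, sn, []) r = (a1, a2, [a3]) := by
      unfold pvRowA; rw [hF]; rfl
    have h3 : a3.length = r.2.length := by
      have : a3 = ((PySem.List.enumerate r.2).foldl (pvCellA r.1) (valor, sn, [])).2.2 := by
        rw [hF]
      rw [this, lenA, PySem.List.length_enumerate]
    rw [hrow, foldRowA_shift rs a1 a2 [a3]]
    simp [h3, ih]

-- cutting the flattened rows back by running offsets restores the rows
lemma reshape (rows : List (List String)) :
    ∀ (vs : List (List String)) (pre : List String) (acc : List (List String)),
    vs.map List.length = rows.map List.length →
    (rows.foldl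
      (fun st row =>
        (st.1 ++ [PySem.List.slice (pre ++ vs.flatten) (some st.2)
            (some (st.2 + Int.ofNat row.length))], st.2 + Int.ofNat row.length))
      (acc, Int.ofNat pre.length)).1 = acc ++ vs := by
  induction rows with
  | nil =>
    intro vs pre acc h
    have : vs = [] := by cases vs <;> simp_all
    simp [this]
  | cons row rows ih =>
    intro vs pre acc h
    cases vs with
    | nil => simp at h
    | cons v vs =>
      simp only [List.map_cons, List.cons.injEq] at h
      obtain ⟨hv, hrest⟩ := h
      simp only [List.foldl_cons]
      have hsl : PySem.List.slice (pre ++ (v :: vs).flatten) (some (Int.ofNat pre.length))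
          (some (Int.ofNat pre.length + Int.ofNat row.length)) = v := by
        have hnc := PySem.List.slice_natCast_add (pre ++ (v :: vs).flatten) pre.length row.length
        simp only [Int.ofNat_eq_natCast] at hnc ⊢
        rw [hnc, List.flatten_cons]
        have hdrop : List.drop pre.length (pre ++ (v ++ vs.flatten)) = v ++ vs.flatten := by
          simp
        rw [hdrop, ← hv, List.take_left]
      rw [hsl]
      have hpos : Int.ofNat pre.length + Int.ofNat row.length = Int.ofNat (pre ++ v).length := by
        simp only [Int.ofNat_eq_natCast, List.length_append]
        push_cast
        omega
      have hflat : pre ++ (v :: vs).flatten = (pre ++ v) ++ vs.flatten := by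
        simp [List.flatten_cons, List.append_assoc]
      rw [hpos, hflat, ih vs (pre ++ v) (acc ++ [v]) hrest]
      simp

lemma enum_nonneg (fb : List (List String)) :
    ∀ ir ∈ PySem.List.enumerate fb, 0 ≤ ir.1 := by
  intro ir hir
  rw [PySem.List.mem_enumerate_iff] at hir
  obtain ⟨k, hk, hp⟩ := hir
  simp [hp]

-- ===== VERDICT (by name: the statement is the Claim_ definition above) =====
theorem getSevenStringScale_spec : Claim_equal_getSevenStringScale := by
  intro fb _ _
  unfold Spec_getSevenStringScale getSevenStringScale getSevenStringScale_alt
  dsimp only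
  rw [main_fold (PySem.List.enumerate fb) (enum_nonneg fb) (some 1) none]
  have hshape :
      (((PySem.List.enumerate fb).foldl pvRowA (some 1, none, [])).2.2).map List.length =
        fb.map List.length := by
    rw [shapeA]
    have h2 : ((PySem.List.enumerate fb).map (·.2)).map List.length =
        (PySem.List.enumerate fb).map (fun ir => ir.2.length) := by
      rw [List.map_map]; rfl
    rw [← h2, PySem.List.map_snd_enumerate]
  have hr := reshape fb (((PySem.List.enumerate fb).foldl pvRowA (some 1, none, [])).2.2) [] [] hshape
  simp only [List.nil_append, List.length_nil] at hr
  exact hr.symm
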